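-- pv_equiv track=rewrite | github.com/samikang/smart-travel-packing | packing_optimizer.py | _violates_max_per_item
-- ===== SOURCE A (Python) =====
-- def _violates_max_per_item(selected_indices, item_names, max_per_item):
--     """Return True if any item type exceeds its max allowed copies.
--
--     Args:
--         selected_indices: Indices of selected items.
--         item_names: List of item names corresponding to all candidates.
--         max_per_item: Mapping from item name to maximum allowed count.
--
--     Returns:
--         True if any item type's selected count exceeds its allowed maximum.
--     """
--     item_counts = {}
--     for i in selected_indices:
--         name = item_names[i]
--         item_counts[name] = item_counts.get(name, 0) + 1
--     for name, cnt in item_counts.items():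
--         allowed = max_per_item.get(name, cnt)
--         if cnt > allowed:
--             return True
--     return False
-- ===== SOURCE B (Python) =====
-- def _violates_max_per_item(selected_indices, item_names, max_per_item):
--     """Single fused pass: keep running counts and fail fast as soon as a
--     capped item's running count passes its cap."""
--     counts = {}
--     for i in selected_indices:
--         name = item_names[i]
--         counts[name] = counts.get(name, 0) + 1
--         if name in max_per_item and counts[name] > max_per_item[name]:
--             return True
--     return False
-- ===== Notes on version B (the rewrite author's own statement) =====
-- stated objective: alternative
-- what changed: A counts all selections into a dict and then scans the finished dict for a violation; B fuses counting and checking into one early-exit pass over selected_indices, returning True the moment a capped name's running count passes its cap (names absent from max_per_item never violate, as in A).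
import Mathlib
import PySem

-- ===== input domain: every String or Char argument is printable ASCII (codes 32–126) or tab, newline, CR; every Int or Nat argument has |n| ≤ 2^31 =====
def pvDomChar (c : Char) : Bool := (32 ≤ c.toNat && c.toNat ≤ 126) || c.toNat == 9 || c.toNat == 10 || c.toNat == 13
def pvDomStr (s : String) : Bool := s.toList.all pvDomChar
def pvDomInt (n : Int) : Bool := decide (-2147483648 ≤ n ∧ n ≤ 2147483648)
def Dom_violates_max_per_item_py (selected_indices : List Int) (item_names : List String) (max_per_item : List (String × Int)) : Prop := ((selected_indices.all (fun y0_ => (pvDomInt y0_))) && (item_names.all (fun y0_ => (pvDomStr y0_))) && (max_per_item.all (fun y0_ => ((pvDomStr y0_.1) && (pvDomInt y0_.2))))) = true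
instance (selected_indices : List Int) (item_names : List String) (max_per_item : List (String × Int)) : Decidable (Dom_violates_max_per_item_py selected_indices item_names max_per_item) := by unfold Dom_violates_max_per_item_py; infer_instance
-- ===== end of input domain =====

-- B fuses A's count-then-scan into one early-exit pass over selected_indices (alternative decomposition, same result).

-- ===== PORT A =====
-- first loop: item_counts[name] = item_counts.get(name, 0) + 1 (none = IndexError on item_names[i])
def pvA_counts (selected_indices : List Int) (item_names : List String) : Option (PySem.Dict String Int) :=
  selected_indices.foldl
    (fun acc i => acc.bind fun d => (PySem.List.pyGet? item_names i).map fun name =>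
      d.insert name (d.getD name 0 + 1))
    (some PySem.Dict.empty)

-- second loop: for name, cnt in item_counts.items(): if cnt > max_per_item.get(name, cnt): return True
def pvA_check (max_per_item : List (String × Int)) : List (String × Int) → Bool
  | [] => false
  | (name, cnt) :: rest =>
    if cnt > (PySem.Dict.mk max_per_item).getD name cnt then true else pvA_check max_per_item rest

def violates_max_per_item_py (selected_indices : List Int) (item_names : List String) (max_per_item : List (String × Int)) : Bool :=
  match pvA_counts selected_indices item_names with
  | none => false      -- unreachable under Pre_ (A raises IndexError there)
  | some d => pvA_check max_per_item d.items

-- ===== PORT B =====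
-- the single fused loop of Source B, with the running counts dict as accumulator
def pvB_go (item_names : List String) (max_per_item : List (String × Int)) :
    List Int → PySem.Dict String Int → Bool
  | [], _ => false
  | i :: rest, counts =>
    match PySem.List.pyGet? item_names i with
    | none => false      -- unreachable under Pre_
    | some name =>
      let counts' := counts.insert name (counts.getD name 0 + 1)
      if (PySem.Dict.mk max_per_item).contains name &&
          decide (counts'.getD name 0 > (PySem.Dict.mk max_per_item).getD name 0)
      then true
      else pvB_go item_names max_per_item rest counts'

def violates_max_per_item_py_alt (selected_indices : List Int) (item_names : List String) (max_per_item : List (String × Int)) : Bool :=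
  pvB_go item_names max_per_item selected_indices PySem.Dict.empty

-- ===== PRECONDITION & SPEC =====
-- Pre_ excludes exactly the inputs where item_names[i] raises IndexError in A.
def Pre_violates_max_per_item_py (selected_indices : List Int) (item_names : List String) (max_per_item : List (String × Int)) : Prop :=
  ∀ i ∈ selected_indices, PySem.Raise.InRange item_names.length i
instance (selected_indices : List Int) (item_names : List String) (max_per_item : List (String × Int)) : Decidable (Pre_violates_max_per_item_py selected_indices item_names max_per_item) := by unfold Pre_violates_max_per_item_py; infer_instance

def pvWitness_violates_max_per_item_py : List Int × List String × (List (String × Int)) :=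
  ([0, 1, 0, -1], ["shirt", "sock"], [("shirt", 2), ("sock", 1)])

def Spec_violates_max_per_item_py (selected_indices : List Int) (item_names : List String) (max_per_item : List (String × Int)) (out : Bool) : Prop := out = violates_max_per_item_py_alt selected_indices item_names max_per_item
instance (selected_indices : List Int) (item_names : List String) (max_per_item : List (String × Int)) (out : Bool) : Decidable (Spec_violates_max_per_item_py selected_indices item_names max_per_item out) := by unfold Spec_violates_max_per_item_py; infer_instance

-- ===== CLAIM =====
def Claim_equal_violates_max_per_item_py : Prop := ∀ (selected_indices : List Int) (item_names : List String) (max_per_item : List (String × Int)), Dom_violates_max_per_item_py selected_indices item_names max_per_item → Pre_violates_max_per_item_py selected_indices item_names max_per_item → Spec_violates_max_per_item_py selected_indices item_names max_per_item (violates_max_per_item_py selected_indices item_names max_per_item)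

-- ===== LEMMAS AND PROOFS =====

-- the names A/B actually read, as a plain list (equal to the lookups under Pre_)
def pvNamesOf (item_names : List String) (selected_indices : List Int) : List String :=
  selected_indices.map (fun i => (PySem.List.pyGet? item_names i).getD "")

-- A's counting loop, with the Option layer stripped (valid under Pre_)
def pvCount (d : PySem.Dict String Int) (ns : List String) : PySem.Dict String Int :=
  ns.foldl (fun d n => d.insert n (d.getD n 0 + 1)) d

lemma pvA_counts_eq (item_names : List String) :
    ∀ (sel : List Int) (d : PySem.Dict String Int),
      (∀ i ∈ sel, PySem.Raise.InRange item_names.length i) →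
      sel.foldl (fun acc i => acc.bind fun d => (PySem.List.pyGet? item_names i).map fun name =>
          d.insert name (d.getD name 0 + 1)) (some d)
        = some (pvCount d (pvNamesOf item_names sel)) := by
  intro sel
  induction sel with
  | nil => intro d _; rfl
  | cons i rest ih =>
    intro d h
    have hi : PySem.Raise.InRange item_names.length i := h i (by simp)
    obtain ⟨name, hn⟩ : ∃ name, PySem.List.pyGet? item_names i = some name := by
      cases hg : PySem.List.pyGet? item_names i with
      | none => exact absurd hi ((PySem.List.pyGet?_eq_none_iff item_names i).mp hg)
      | some v => exact ⟨v, rfl⟩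
    simp only [List.foldl_cons, Option.bind_some, hn, Option.map_some]
    rw [ih _ (fun j hj => h j (by simp [hj]))]
    simp [pvNamesOf, pvCount, hn]

-- B's loop, with the Option layer stripped (valid under Pre_)
def pvBgo' (max_per_item : List (String × Int)) : List String → PySem.Dict String Int → Bool
  | [], _ => false
  | name :: rest, counts =>
    let counts' := counts.insert name (counts.getD name 0 + 1)
    if (PySem.Dict.mk max_per_item).contains name &&
        decide (counts'.getD name 0 > (PySem.Dict.mk max_per_item).getD name 0)
    then true
    else pvBgo' max_per_item rest counts'

lemma pvB_go_eq (item_names : List String) (max_per_item : List (String × Int)) :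
    ∀ (sel : List Int) (d : PySem.Dict String Int),
      (∀ i ∈ sel, PySem.Raise.InRange item_names.length i) →
      pvB_go item_names max_per_item sel d = pvBgo' max_per_item (pvNamesOf item_names sel) d := by
  intro sel
  induction sel with
  | nil => intro d _; rfl
  | cons i rest ih =>
    intro d h
    have hi : PySem.Raise.InRange item_names.length i := h i (by simp)
    obtain ⟨name, hn⟩ : ∃ name, PySem.List.pyGet? item_names i = some name := by
      cases hg : PySem.List.pyGet? item_names i with
      | none => exact absurd hi ((PySem.List.pyGet?_eq_none_iff item_names i).mp hg)
      | some v => exact ⟨v, rfl⟩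
    simp only [pvB_go, hn, pvNamesOf, List.map_cons, Option.getD_some, pvBgo']
    split
    · rfl
    · exact ih _ (fun j hj => h j (by simp [hj]))

-- A's check loop returns true iff some item is capped and over its cap
lemma pvA_check_eq_any (max_per_item : List (String × Int)) (l : List (String × Int)) :
    pvA_check max_per_item l
      = l.any (fun p => (PySem.Dict.mk max_per_item).contains p.1 &&
          decide (p.2 > (PySem.Dict.mk max_per_item).getD p.1 0)) := by
  induction l with
  | nil => rfl
  | cons p rest ih =>
    obtain ⟨name, cnt⟩ := p
    simp only [pvA_check, List.any_cons, ← ih]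
    cases hq : (PySem.Dict.mk max_per_item).get? name with
    | none =>
      have hc : (PySem.Dict.mk max_per_item).contains name = false := by
        rw [PySem.Dict.contains_eq_isSome_get?, hq]; rfl
      rw [PySem.Dict.getD_of_get?_eq_none _ cnt hq]
      simp [hc]
    | some v =>
      have hc : (PySem.Dict.mk max_per_item).contains name = true := by
        rw [PySem.Dict.contains_eq_isSome_get?, hq]; rfl
      rw [PySem.Dict.getD_of_get?_eq_some _ cnt hq, PySem.Dict.getD_of_get?_eq_some _ 0 hq]
      by_cases hlt : cnt > v <;> simp [hlt, hc]

lemma pvCount_getD (d : PySem.Dict String Int) (ns : List String) (v : String) :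
    (pvCount d ns).getD v 0 = d.getD v 0 + ns.count v :=
  PySem.Dict.getD_foldl_insert_add_one ns d v

lemma pvCount_nodup (d : PySem.Dict String Int) (ns : List String) (h : d.keys.Nodup) :
    (pvCount d ns).keys.Nodup :=
  PySem.Dict.nodup_keys_foldl_insert ns _ d h

lemma pvCount_mem_keys (d : PySem.Dict String Int) (ns : List String) (v : String)
    (h : v ∈ d.keys) : v ∈ (pvCount d ns).keys := by
  unfold pvCount
  rw [PySem.Dict.keys_foldl_insert]
  rw [PySem.Set.update_eq_append_filter]
  exact List.mem_append_left _ h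

-- main invariant lemma: from any counts dict with unique keys in which no capped
-- name is over its cap yet, B's remaining loop equals A's check of the final counts
lemma pvMain (max_per_item : List (String × Int)) :
    ∀ (ns : List String) (d : PySem.Dict String Int),
      d.keys.Nodup →
      (∀ k ∈ d.keys, (PySem.Dict.mk max_per_item).contains k = true →
        d.getD k 0 ≤ (PySem.Dict.mk max_per_item).getD k 0) →
      pvBgo' max_per_item ns d = pvA_check max_per_item (pvCount d ns).items := by
  intro ns
  induction ns with
  | nil =>
    intro d hnd hinv
    rw [pvA_check_eq_any]
    simp only [pvCount, List.foldl_nil, pvBgo']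
    symm
    rw [List.any_eq_false]
    intro p hp
    obtain ⟨name, cnt⟩ := p
    by_cases hc : (PySem.Dict.mk max_per_item).contains name = true
    · have hv : d.getD name 0 = cnt := PySem.Dict.getD_of_mem_items d hp hnd 0
      have := hinv name (PySem.Dict.mem_keys_of_mem_items d hp) hc
      rw [hv] at this
      simp [hc, not_lt.mpr this]
    · simp [hc]
  | cons name rest ih =>
    intro d hnd hinv
    simp only [pvBgo']
    have hgd' : (d.insert name (d.getD name 0 + 1)).getD name 0 = d.getD name 0 + 1 :=
      PySem.Dict.getD_insert_self d name _ 0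
    have hnd' : (d.insert name (d.getD name 0 + 1)).keys.Nodup :=
      PySem.Dict.nodup_keys_insert d name _ hnd
    have hcount : pvCount d (name :: rest) = pvCount (d.insert name (d.getD name 0 + 1)) rest := rfl
    by_cases hfire : (PySem.Dict.mk max_per_item).contains name = true ∧
        (d.insert name (d.getD name 0 + 1)).getD name 0 > (PySem.Dict.mk max_per_item).getD name 0
    · -- B fires; show A's check of the final counts is also true
      have hctrue : ((PySem.Dict.mk max_per_item).contains name &&
          decide ((d.insert name (d.getD name 0 + 1)).getD name 0 >
            (PySem.Dict.mk max_per_item).getD name 0)) = true := by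
        rw [hfire.1, Bool.true_and, decide_eq_true hfire.2]
      rw [if_pos hctrue]
      rw [hcount, pvA_check_eq_any]
      have hmemk : name ∈ (pvCount (d.insert name (d.getD name 0 + 1)) rest).keys :=
        pvCount_mem_keys _ rest name
          ((PySem.Dict.mem_keys_insert d name name _).mpr (Or.inl rfl))
      have hnodupf : (pvCount (d.insert name (d.getD name 0 + 1)) rest).keys.Nodup :=
        pvCount_nodup _ rest hnd'
      have hitem : (name, (pvCount (d.insert name (d.getD name 0 + 1)) rest).getD name 0)
          ∈ (pvCount (d.insert name (d.getD name 0 + 1)) rest).items := by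
        rw [PySem.Dict.items_eq_map_keys _ hnodupf 0]
        exact List.mem_map.mpr ⟨name, hmemk, rfl⟩
      symm
      rw [List.any_eq_true]
      refine ⟨_, hitem, ?_⟩
      have hge : (d.insert name (d.getD name 0 + 1)).getD name 0
          ≤ (pvCount (d.insert name (d.getD name 0 + 1)) rest).getD name 0 := by
        rw [pvCount_getD]; simp
      have h2 := hfire.2
      simp only [hfire.1, Bool.true_and, decide_eq_true_eq]
      omega
    · -- B does not fire; the invariant carries to the updated counts
      have hcond : ((PySem.Dict.mk max_per_item).contains name &&
          decide ((d.insert name (d.getD name 0 + 1)).getD name 0 >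
            (PySem.Dict.mk max_per_item).getD name 0)) = false := by
        by_cases h1 : (PySem.Dict.mk max_per_item).contains name = true
        · have h2 : ¬ (d.insert name (d.getD name 0 + 1)).getD name 0 >
              (PySem.Dict.mk max_per_item).getD name 0 := fun h2 => hfire ⟨h1, h2⟩
          rw [h1, Bool.true_and, decide_eq_false h2]
        · rw [Bool.not_eq_true] at h1
          rw [h1, Bool.false_and]
      rw [if_neg (by rw [hcond]; exact Bool.false_ne_true)]
      rw [hcount]
      refine ih _ hnd' ?_
      intro k hmem hk
      by_cases hkn : k = name
      · subst hkn
        have : ¬ (d.insert k (d.getD k 0 + 1)).getD k 0 >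
            (PySem.Dict.mk max_per_item).getD k 0 := fun h2 => hfire ⟨hk, h2⟩
        omega
      · rw [PySem.Dict.getD_insert]
        rw [if_neg hkn]
        have hmem' : k ∈ d.keys := by
          rcases (PySem.Dict.mem_keys_insert d name k _).mp hmem with h | h
          · exact absurd h hkn
          · exact h
        exact hinv k hmem' hk

-- ===== VERDICT =====
theorem violates_max_per_item_py_spec : Claim_equal_violates_max_per_item_py := by
  intro sel names mpi _ hpre
  unfold Spec_violates_max_per_item_py violates_max_per_item_py violates_max_per_item_py_alt
  unfold pvA_counts
  rw [pvA_counts_eq names sel PySem.Dict.empty hpre]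
  rw [pvB_go_eq names mpi sel PySem.Dict.empty hpre]
  exact (pvMain mpi (pvNamesOf names sel) PySem.Dict.empty
    PySem.Dict.nodup_keys_empty (by intro k hk _; simp [PySem.Dict.keys_empty] at hk)).symm
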